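-- pv_equiv track=rewrite | github.com/DDRnJn/FundamentalsOfBioinformatics | hw12.py | getCD
-- ===== SOURCE A (Python) =====
-- from collections import defaultdict
-- import copy
--
-- def getCD(BW):
--
--     alphabet = list(set(BW))
--     countDict = defaultdict(lambda: defaultdict(int))
--     for i in alphabet:
--         countDict[0][i]=0
--     for i in range(len(BW)):
--         current = copy.copy(countDict[i])
--         current[BW[i]]+=1
--         countDict[i+1]=copy.copy(current)
--     return countDict
-- ===== SOURCE B (Python) =====
-- from collections import defaultdict
--
-- def getCD(BW):
--     countDict = defaultdict(lambda: defaultdict(int))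
--     n = len(BW)
--     for c in set(BW):
--         running = 0
--         for i in range(n):
--             countDict[i][c] = running
--             if BW[i] == c:
--                 running += 1
--         countDict[n][c] = running
--     return countDict
-- ===== Notes on version B (the rewrite author's own statement) =====
-- stated objective: alternative
-- what changed: B fills the count table character-major (one running counter per distinct character sweeping all positions) instead of A's position-major loop that snapshot-copies the previous position's dict at every step.
import Mathlib
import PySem

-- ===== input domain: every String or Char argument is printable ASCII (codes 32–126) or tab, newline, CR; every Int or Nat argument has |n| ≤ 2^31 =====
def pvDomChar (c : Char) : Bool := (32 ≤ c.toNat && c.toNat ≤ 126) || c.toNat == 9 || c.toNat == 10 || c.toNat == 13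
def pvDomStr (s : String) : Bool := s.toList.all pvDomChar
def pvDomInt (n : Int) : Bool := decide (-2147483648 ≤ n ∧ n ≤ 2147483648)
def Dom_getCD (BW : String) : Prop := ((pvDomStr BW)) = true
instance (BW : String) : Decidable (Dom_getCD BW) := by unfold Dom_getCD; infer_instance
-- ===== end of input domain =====

-- B builds the same prefix-count table character-major (one running counter per distinct
-- character sweeping the positions) instead of A's position-major loop that copies the
-- previous position's dict at every step; same cost, different decomposition.

-- ===== PORT A =====
def getCD (BW : String) : List (Int × List (String × Int)) :=
  let chars : List String := BW.toList.map (fun c => String.ofList [c])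
  let alphabet : List String := PySem.Set.ofList chars
  let countDict0 : PySem.Dict Int (PySem.Dict String Int) :=
    alphabet.foldl (fun d i => d.insert 0 ((d.getD 0 PySem.Dict.empty).insert i 0))
      PySem.Dict.empty
  let countDict :=
    (PySem.List.pyRange 0 (chars.length : Int) 1).foldl
      (fun d i =>
        let current := (d.getD i PySem.Dict.empty).modify (PySem.List.pyGetD chars i "") 0 (· + 1)
        d.insert (i + 1) current)
      countDict0
  countDict.items.map (fun p => (p.1, p.2.items))

-- ===== PORT B =====
def getCD_alt (BW : String) : List (Int × List (String × Int)) :=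
  let chars : List String := BW.toList.map (fun c => String.ofList [c])
  let n : Int := (chars.length : Int)
  let countDict : PySem.Dict Int (PySem.Dict String Int) :=
    (PySem.Set.ofList chars).foldl
      (fun d c =>
        let st :=
          (PySem.List.pyRange 0 n 1).foldl
            (fun (st : PySem.Dict Int (PySem.Dict String Int) × Int) i =>
              (st.1.insert i ((st.1.getD i PySem.Dict.empty).insert c st.2),
               if PySem.List.pyGetD chars i "" == c then st.2 + 1 else st.2))
            (d, 0)
        st.1.insert n ((st.1.getD n PySem.Dict.empty).insert c st.2))
      PySem.Dict.empty
  countDict.items.map (fun p => (p.1, p.2.items))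

-- ===== PRECONDITION & SPEC =====
def Spec_getCD (BW : String) (out : List (Int × List (String × Int))) : Prop := out = getCD_alt BW
instance (BW : String) (out : List (Int × List (String × Int))) : Decidable (Spec_getCD BW out) := by unfold Spec_getCD; infer_instance

-- ===== CLAIM (what is proved, stated in full; the proofs are below) =====
def Claim_equal_getCD : Prop := ∀ (BW : String), Dom_getCD BW → Spec_getCD BW (getCD BW)

-- ===== LEMMAS AND PROOFS =====

def pvCnt (L : List String) (i : Nat) (c : String) : Int := (((L.take i).count c : Nat) : Int)

theorem pvCnt_succ (L : List String) (k : Nat) (c : String) (hk : k < L.length) :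
    pvCnt L (k + 1) c = pvCnt L k c + if c = L[k] then 1 else 0 := by
  unfold pvCnt
  rw [List.take_add_one, List.getElem?_eq_getElem hk]
  simp only [Option.toList_some, List.count_append, List.count_cons, List.count_nil]
  by_cases h : c = L[k]
  · rw [if_pos h, if_pos (by simp [h])]
    push_cast; ring
  · rw [if_neg h, if_neg (fun hh => h (eq_comm.mp (beq_iff_eq.mp hh)))]
    push_cast; ring

theorem pv_get?_rangeMap {v : Type} (f : Nat -> v) (k j : Nat) (hj : j < k) :
    (PySem.Dict.mk ((List.range k).map (fun (i : Nat) => ((i : Int), f i)))).get? (j : Int) = some (f j) := by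
  apply PySem.Dict.get?_of_mem_items
  · exact List.mem_map.mpr ⟨j, List.mem_range.mpr hj, rfl⟩
  · simp [PySem.Dict.keys_mk, List.map_map]
    exact List.nodup_range.map (fun a b h => by simpa using h)

theorem pv_contains_rangeMap {v : Type} (f : Nat -> v) (k j : Nat) (hj : k <= j) :
    (PySem.Dict.mk ((List.range k).map (fun (i : Nat) => ((i : Int), f i)))).contains (j : Int) = false := by
  rw [PySem.Dict.contains_eq_decide_mem_keys]
  simp [PySem.Dict.keys_mk, List.map_map]
  omega

def pvRow (ps L : List String) (i : Nat) : PySem.Dict String Int :=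
  PySem.Dict.mk (ps.map (fun c => (c, pvCnt L i c)))

def pvTab (ps L : List String) (k : Nat) : PySem.Dict Int (PySem.Dict String Int) :=
  PySem.Dict.mk ((List.range k).map (fun (i : Nat) => ((i : Int), pvRow ps L i)))

theorem pv_d0_inner (cs : List String) (hnd : cs.Nodup) :
    (cs.foldl (fun e c => e.insert c 0) (PySem.Dict.empty : PySem.Dict String Int)).items
      = cs.map (fun c => (c, (0 : Int))) := by
  have := PySem.Dict.items_foldl_insert_fresh (l := cs) (k := fun c => c) (v := fun _ => (0 : Int))
    (d := PySem.Dict.empty) (by intro a _; simp) (by simpa using hnd)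
  simpa using this

theorem pv_d0_outer (cs : List String) (e : PySem.Dict String Int) :
    cs.foldl (fun d i => d.insert 0 ((d.getD 0 PySem.Dict.empty).insert i 0))
        (PySem.Dict.mk [((0 : Int), e)])
      = PySem.Dict.mk [((0 : Int), cs.foldl (fun e c => e.insert c 0) e)] := by
  induction cs generalizing e with
  | nil => rfl
  | cons c cs ih =>
    simp only [List.foldl_cons]
    have h1 : (PySem.Dict.mk [((0 : Int), e)]).getD 0 PySem.Dict.empty = e := by
      simp [PySem.Dict.getD_eq_get?_getD, PySem.Dict.get?_mk_cons]
    have h2 : (PySem.Dict.mk [((0 : Int), e)]).insert 0 (e.insert c 0)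
        = PySem.Dict.mk [((0 : Int), e.insert c 0)] := by
      apply PySem.Dict.ext; simp [PySem.Dict.items_insert, PySem.Dict.contains_mk]
    rw [h1, h2, ih]

theorem pv_d0 (L cs : List String) (hnd : cs.Nodup) (hne : cs ≠ []) :
    cs.foldl (fun d i => d.insert 0 ((d.getD 0 PySem.Dict.empty).insert i 0))
        (PySem.Dict.empty : PySem.Dict Int (PySem.Dict String Int))
      = pvTab cs L 1 := by
  match cs, hne with
  | c :: cs, _ =>
    simp only [List.foldl_cons]
    have h0 : ((PySem.Dict.empty : PySem.Dict Int (PySem.Dict String Int)).insert 0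
        (((PySem.Dict.empty : PySem.Dict Int (PySem.Dict String Int)).getD 0 PySem.Dict.empty).insert c 0))
        = PySem.Dict.mk [((0 : Int), (PySem.Dict.empty : PySem.Dict String Int).insert c 0)] := by
      apply PySem.Dict.ext
      simp [PySem.Dict.items_insert, PySem.Dict.getD_empty]; rfl
    have hitems : (cs.foldl (fun e c' => e.insert c' 0) (PySem.Dict.empty.insert c 0)).items
        = (c :: cs).map (fun c => (c, (0 : Int))) := by
      have := pv_d0_inner (c :: cs) hnd
      simpa using this
    have hinner : (cs.foldl (fun e c' => e.insert c' 0) ((PySem.Dict.empty : PySem.Dict String Int).insert c 0))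
        = PySem.Dict.mk ((c :: cs).map (fun c => (c, (0 : Int)))) := PySem.Dict.ext hitems
    rw [h0, pv_d0_outer, hinner]
    simp [pvTab, pvRow, pvCnt, List.range_one]

def pvStepA (L : List String) (d : PySem.Dict Int (PySem.Dict String Int)) (j : Nat) :
    PySem.Dict Int (PySem.Dict String Int) :=
  d.insert ((j : Int) + 1) ((d.getD (j : Int) PySem.Dict.empty).modify (L.getD j "") 0 (· + 1))

theorem pv_row_keys_nodup (ps L : List String) (i : Nat) (hnd : ps.Nodup) :
    (pvRow ps L i).keys.Nodup := by
  simp only [pvRow, PySem.Dict.keys_mk, List.map_map]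
  simpa [Function.comp_def] using hnd

theorem pv_row_getD (ps L : List String) (i : Nat) (c : String) (hc : c ∈ ps) (hnd : ps.Nodup) :
    (pvRow ps L i).getD c 0 = pvCnt L i c := by
  apply PySem.Dict.getD_of_mem_items
  · exact List.mem_map.mpr ⟨c, hc, rfl⟩
  · exact pv_row_keys_nodup ps L i hnd

theorem pv_row_bump (ps L : List String) (k : Nat) (hk : k < L.length) (hnd : ps.Nodup)
    (hc : L[k] ∈ ps) :
    (pvRow ps L k).insert L[k] (pvCnt L k L[k] + 1) = pvRow ps L (k + 1) := by
  apply PySem.Dict.ext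
  rw [PySem.Dict.items_insert_of_contains]
  · simp only [pvRow, List.map_map]
    apply List.map_congr_left
    intro a _
    by_cases h : a = L[k]
    · simp only [Function.comp, h, beq_self_eq_true, if_pos]
      rw [pvCnt_succ L k L[k] hk, if_pos rfl]
    · simp only [Function.comp]
      rw [if_neg (by simpa using h)]
      rw [pvCnt_succ L k a hk, if_neg h, add_zero]
  · rw [PySem.Dict.contains_eq_decide_mem_keys]
    simp only [pvRow, PySem.Dict.keys_mk, List.map_map]
    simpa [Function.comp_def] using hc

theorem pv_tab_getD (ps L : List String) (k j : Nat) (hj : j < k) :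
    (pvTab ps L k).getD (j : Int) PySem.Dict.empty = pvRow ps L j := by
  rw [PySem.Dict.getD_eq_get?_getD, pvTab, pv_get?_rangeMap _ k j hj]
  rfl

theorem pv_tab_snoc (ps L : List String) (k : Nat) (r : PySem.Dict String Int)
    (hr : r = pvRow ps L k) :
    (pvTab ps L k).insert ((k : Int)) r = pvTab ps L (k + 1) := by
  apply PySem.Dict.ext
  have hcont : (PySem.Dict.mk ((List.range k).map (fun (i : Nat) => ((i : Int), pvRow ps L i)))).contains
      (k : Int) = false := pv_contains_rangeMap _ k k le_rfl
  rw [pvTab, PySem.Dict.items_insert_of_not_contains _ r hcont]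
  simp [pvTab, List.range_succ, hr]

theorem pv_A_loop (L ps : List String) (hnd : ps.Nodup) (hsub : ∀ c ∈ L, c ∈ ps)
    (k : Nat) (hk : k ≤ L.length) :
    (List.range k).foldl (pvStepA L) (pvTab ps L 1) = pvTab ps L (k + 1) := by
  induction k with
  | zero => simp
  | succ k ih =>
    have hk' : k < L.length := hk
    rw [List.range_succ, List.foldl_append, ih (Nat.le_of_lt hk')]
    simp only [List.foldl_cons, List.foldl_nil, pvStepA]
    rw [pv_tab_getD ps L (k + 1) k (Nat.lt_succ_self k)]
    have hget : L.getD k "" = L[k] := List.getD_eq_getElem L "" hk'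
    have hmem : L[k] ∈ ps := hsub _ (List.getElem_mem hk')
    rw [hget]
    simp only [PySem.Dict.modify]
    rw [pv_row_getD ps L k L[k] hmem hnd, pv_row_bump ps L k hk' hnd hmem]
    have hcast : ((k : Int) + 1) = (((k + 1 : Nat)) : Int) := by push_cast; ring
    rw [hcast, pv_tab_snoc ps L (k + 1) _ rfl]

def pvStepB (L : List String) (c : String)
    (st : PySem.Dict Int (PySem.Dict String Int) × Int) (j : Nat) :
    PySem.Dict Int (PySem.Dict String Int) × Int :=
  (st.1.insert (j : Int) ((st.1.getD (j : Int) PySem.Dict.empty).insert c st.2),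
   if L.getD j "" == c then st.2 + 1 else st.2)

def pvPass (L : List String) (d : PySem.Dict Int (PySem.Dict String Int)) (c : String) :
    PySem.Dict Int (PySem.Dict String Int) :=
  let st := (List.range L.length).foldl (pvStepB L c) (d, 0)
  st.1.insert (L.length : Int) ((st.1.getD (L.length : Int) PySem.Dict.empty).insert c st.2)

def pvTabP (ps L : List String) (c : String) (k : Nat) : PySem.Dict Int (PySem.Dict String Int) :=
  PySem.Dict.mk ((List.range (L.length + 1)).map (fun (i : Nat) => ((i : Int),
    if i < k then PySem.Dict.mk (ps.map (fun c' => (c', pvCnt L i c')) ++ [(c, pvCnt L i c)])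
    else pvRow ps L i)))

theorem pvCnt_step (L : List String) (c : String) (k : Nat) (hk : k < L.length) :
    (if L.getD k "" == c then pvCnt L k c + 1 else pvCnt L k c) = pvCnt L (k + 1) c := by
  rw [List.getD_eq_getElem L "" hk, pvCnt_succ L k c hk]
  by_cases h : c = L[k]
  · rw [if_pos (by simp [h]), if_pos h]
  · rw [if_neg (by simpa using fun hh => h hh.symm), if_neg h, add_zero]

theorem pv_empty_insert (c : String) (v : Int) :
    (PySem.Dict.empty : PySem.Dict String Int).insert c v = PySem.Dict.mk [(c, v)] := by
  apply PySem.Dict.ext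
  rw [PySem.Dict.items_insert_of_not_contains _ v (PySem.Dict.contains_empty c)]
  rfl

theorem pv_row_append (ps L : List String) (c : String) (i : Nat) (hc : c ∉ ps) :
    (pvRow ps L i).insert c (pvCnt L i c)
      = PySem.Dict.mk (ps.map (fun c' => (c', pvCnt L i c')) ++ [(c, pvCnt L i c)]) := by
  apply PySem.Dict.ext
  have hcont : (pvRow ps L i).contains c = false := by
    rw [PySem.Dict.contains_eq_decide_mem_keys]
    simp only [pvRow, PySem.Dict.keys_mk, List.map_map]
    simpa [Function.comp_def] using hc
  rw [PySem.Dict.items_insert_of_not_contains _ _ hcont]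
  rfl

theorem pv_B_first (L : List String) (c : String) (k : Nat) (hk : k ≤ L.length) :
    (List.range k).foldl (pvStepB L c) (PySem.Dict.empty, 0)
      = (pvTab [c] L k, pvCnt L k c) := by
  induction k with
  | zero =>
    simp only [List.range_zero, List.foldl_nil, pvTab, List.map_nil, pvCnt, List.take_zero,
      List.count_nil, Nat.cast_zero]
    rfl
  | succ k ih =>
    have hk' : k < L.length := hk
    rw [List.range_succ, List.foldl_append, ih (Nat.le_of_lt hk')]
    simp only [List.foldl_cons, List.foldl_nil, pvStepB]
    have hcont : (pvTab [c] L k).contains (k : Int) = false :=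
      pv_contains_rangeMap _ k k le_rfl
    rw [PySem.Dict.getD_of_not_contains _ _ hcont, pv_empty_insert]
    have h1 : (pvTab [c] L k).insert (k : Int) (PySem.Dict.mk [(c, pvCnt L k c)])
        = pvTab [c] L (k + 1) :=
      pv_tab_snoc [c] L k _ (by simp [pvRow])
    rw [h1, pvCnt_step L c k hk']

theorem pv_B_later (L ps : List String) (c : String) (hc : c ∉ ps) (k : Nat) (hk : k ≤ L.length) :
    (List.range k).foldl (pvStepB L c) (pvTab ps L (L.length + 1), 0)
      = (pvTabP ps L c k, pvCnt L k c) := by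
  induction k with
  | zero =>
    simp only [List.range_zero, List.foldl_nil, Prod.mk.injEq]
    refine ⟨?_, by simp [pvCnt]⟩
    simp only [pvTab, pvTabP]
    congr 1
  | succ k ih =>
    have hk' : k < L.length := hk
    rw [List.range_succ, List.foldl_append, ih (Nat.le_of_lt hk')]
    simp only [List.foldl_cons, List.foldl_nil, pvStepB]
    have hget : (pvTabP ps L c k).getD (k : Int) PySem.Dict.empty = pvRow ps L k := by
      rw [PySem.Dict.getD_eq_get?_getD, pvTabP, pv_get?_rangeMap _ (L.length + 1) k (by omega)]
      simp
    rw [hget, pv_row_append ps L c k hc]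
    have hcontk : (pvTabP ps L c k).contains (k : Int) = true := by
      rw [PySem.Dict.contains_eq_decide_mem_keys]
      simp only [pvTabP, PySem.Dict.keys_mk, List.map_map]
      simp only [decide_eq_true_eq]
      exact List.mem_map.mpr ⟨k, by simp; omega, rfl⟩
    have h1 : (pvTabP ps L c k).insert (k : Int)
        (PySem.Dict.mk (ps.map (fun c' => (c', pvCnt L k c')) ++ [(c, pvCnt L k c)]))
        = pvTabP ps L c (k + 1) := by
      apply PySem.Dict.ext
      rw [PySem.Dict.items_insert_of_contains _ _ hcontk]
      simp only [pvTabP, List.map_map]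
      apply List.map_congr_left
      intro i hi
      by_cases h : i = k
      · subst h
        simp
      · have hbeq : (((i : Nat) : Int) == ((k : Nat) : Int)) = false := by
          simpa using fun hh => h (by exact_mod_cast hh)
        by_cases hlt : i < k
        · simp [hlt, show i < k + 1 from by omega]
          intro h'
          exact absurd h' h
        · simp [hlt, show ¬ i < k + 1 from by omega]
          intro h'
          exact absurd h' h
    rw [h1, pvCnt_step L c k hk']

theorem pv_B_pass_first (L : List String) (c : String) :
    pvPass L PySem.Dict.empty c = pvTab [c] L (L.length + 1) := by
  rw [pvPass, pv_B_first L c L.length le_rfl]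
  simp only
  have hcont : (pvTab [c] L L.length).contains (L.length : Int) = false :=
    pv_contains_rangeMap _ L.length L.length le_rfl
  rw [PySem.Dict.getD_of_not_contains _ _ hcont, pv_empty_insert]
  exact pv_tab_snoc [c] L L.length _ (by simp [pvRow])

theorem pv_B_pass_later (L ps : List String) (c : String) (hc : c ∉ ps) :
    pvPass L (pvTab ps L (L.length + 1)) c = pvTab (ps ++ [c]) L (L.length + 1) := by
  rw [pvPass, pv_B_later L ps c hc L.length le_rfl]
  simp only
  have hget : (pvTabP ps L c L.length).getD (L.length : Int) PySem.Dict.empty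
      = pvRow ps L L.length := by
    rw [PySem.Dict.getD_eq_get?_getD, pvTabP, pv_get?_rangeMap _ (L.length + 1) L.length (by omega)]
    simp
  rw [hget, pv_row_append ps L c L.length hc]
  have hcontn : (pvTabP ps L c L.length).contains (L.length : Int) = true := by
    rw [PySem.Dict.contains_eq_decide_mem_keys]
    simp only [pvTabP, PySem.Dict.keys_mk, List.map_map]
    simp only [decide_eq_true_eq]
    exact List.mem_map.mpr ⟨L.length, by simp, rfl⟩
  apply PySem.Dict.ext
  rw [PySem.Dict.items_insert_of_contains _ _ hcontn]
  simp only [pvTabP, pvTab, List.map_map]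
  apply List.map_congr_left
  intro i hi
  have hrow : PySem.Dict.mk (ps.map (fun c' => (c', pvCnt L i c')) ++ [(c, pvCnt L i c)])
      = pvRow (ps ++ [c]) L i := by
    simp [pvRow]
  by_cases h : i = L.length
  · subst h
    simp [hrow]
  · have hbeq : (((i : Nat) : Int) == ((L.length : Nat) : Int)) = false := by
      simpa using fun hh => h (by exact_mod_cast hh)
    have hlt : i < L.length := by simp at hi; omega
    simp [hlt, hrow]
    intro h'
    exact absurd h' h

theorem pv_B_outer (L cs ps : List String) (hdisj : ∀ c ∈ cs, c ∉ ps) (hnd : cs.Nodup) :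
    cs.foldl (pvPass L) (pvTab ps L (L.length + 1)) = pvTab (ps ++ cs) L (L.length + 1) := by
  induction cs generalizing ps with
  | nil => simp
  | cons c cs ih =>
    rw [List.foldl_cons, pv_B_pass_later L ps c (hdisj c (List.mem_cons_self))]
    rw [ih (ps ++ [c]) ?_ (List.nodup_cons.mp hnd).2]
    · simp
    · intro c' hc'
      simp only [List.mem_append, List.mem_singleton]
      rintro (h | h)
      · exact hdisj c' (List.mem_cons_of_mem c hc') h
      · exact (List.nodup_cons.mp hnd).1 (h ▸ hc')

theorem pv_range_cast (n : Nat) :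
    PySem.List.pyRange 0 (n : Int) 1 = (List.range n).map (fun k : Nat => (k : Int)) := by
  simp [PySem.List.pyRange_one]

-- ===== VERDICT (by name: the statement is the Claim_ definition above) =====
theorem getCD_spec : Claim_equal_getCD := by
  intro BW _
  unfold Spec_getCD
  simp only [getCD, getCD_alt]
  set L : List String := BW.toList.map (fun c => String.ofList [c]) with hLdef
  have keyA : ∀ (init : PySem.Dict Int (PySem.Dict String Int)),
      (PySem.List.pyRange 0 (L.length : Int) 1).foldl
        (fun d i => d.insert (i + 1)
          ((d.getD i PySem.Dict.empty).modify (PySem.List.pyGetD L i "") 0 (· + 1))) init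
      = (List.range L.length).foldl (pvStepA L) init := by
    intro init
    rw [pv_range_cast, List.foldl_map]
    congr 1
    funext d j
    simp [pvStepA]
  have keyB : (fun (d : PySem.Dict Int (PySem.Dict String Int)) (c : String) =>
      let st := (PySem.List.pyRange 0 (L.length : Int) 1).foldl
        (fun (st : PySem.Dict Int (PySem.Dict String Int) × Int) i =>
          (st.1.insert i ((st.1.getD i PySem.Dict.empty).insert c st.2),
           if PySem.List.pyGetD L i "" == c then st.2 + 1 else st.2)) (d, 0)
      st.1.insert (L.length : Int) ((st.1.getD (L.length : Int) PySem.Dict.empty).insert c st.2))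
      = pvPass L := by
    funext d c
    simp only [pv_range_cast, List.foldl_map, pvPass, PySem.List.pyGetD_natCast]
    rfl
  cases hcs : PySem.Set.ofList L with
  | nil =>
    have hLnil : L = [] := by
      cases hL : L with
      | nil => rfl
      | cons a as =>
        exfalso
        have ha : a ∈ PySem.Set.ofList L := by
          rw [PySem.Set.mem_ofList, hL]; exact List.mem_cons_self
        rw [hcs] at ha
        exact (List.not_mem_nil) ha
    rw [hLnil]
    simp
  | cons a as =>
    have hnd : (a :: as).Nodup := hcs ▸ PySem.Set.nodup_ofList L
    have hsub : ∀ c ∈ L, c ∈ a :: as := fun c hc => hcs ▸ (PySem.Set.mem_ofList L c).mpr hc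
    rw [keyA, keyB]
    rw [pv_d0 L (a :: as) hnd (List.cons_ne_nil a as)]
    rw [pv_A_loop L (a :: as) hnd hsub L.length le_rfl]
    rw [List.foldl_cons, pv_B_pass_first L a]
    rw [pv_B_outer L as [a]
      (fun c hc h => (List.nodup_cons.mp hnd).1 ((List.mem_singleton.mp h) ▸ hc))
      (List.nodup_cons.mp hnd).2]
    rfl
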